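-- pv_equiv track=rewrite | github.com/282207134/Pythonlianxi | 加热时间计算.py | microwave_heating_time
-- ===== SOURCE A (Python) =====
-- def microwave_heating_time(N, S):
--     allowed_foods = "cbpho"  # 電子レンジで加熱できる食品を示す文字列
--     time = 0
--     for food in S:
--         if food not in allowed_foods:
--             break  # 電子レンジで加熱できない食品が含まれた場合、中止
--         if food == 'c':
--             time += 4 * 60  # カレーは4分
--         elif food == 'b':
--             time += 3 * 60  # ビーフシチューは3分
--         elif food == 'p':
--             time += 3 * 60  # パスタソースは3分
--         elif food == 'h':
--             time += 1 * 60 + 30  # ハンバーグは1分30秒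
--         elif food == 'o':
--             time += 50  # オムレツは50秒
--     return time
-- ===== SOURCE B (Python) =====
-- def microwave_heating_time(N, S):
--     weights = {'c': 240, 'b': 180, 'p': 180, 'h': 90, 'o': 50}
--     # phase 1: isolate the maximal valid prefix (index of first invalid char)
--     cut = len(S)
--     for i, c in enumerate(S):
--         if c not in weights:
--             cut = i
--             break
--     prefix = S[:cut]
--     # phase 2: aggregate by counting each food in the prefix
--     return sum(w * prefix.count(f) for f, w in weights.items())
-- ===== Notes on version B (the rewrite author's own statement) =====
-- stated objective: alternative
-- what changed: Replaced the single break-on-invalid accumulating loop over an elif chain by a two-stage shape: first cut the maximal valid prefix of S, then aggregate as a weighted sum of per-food character counts over that prefix.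
import Mathlib
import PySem

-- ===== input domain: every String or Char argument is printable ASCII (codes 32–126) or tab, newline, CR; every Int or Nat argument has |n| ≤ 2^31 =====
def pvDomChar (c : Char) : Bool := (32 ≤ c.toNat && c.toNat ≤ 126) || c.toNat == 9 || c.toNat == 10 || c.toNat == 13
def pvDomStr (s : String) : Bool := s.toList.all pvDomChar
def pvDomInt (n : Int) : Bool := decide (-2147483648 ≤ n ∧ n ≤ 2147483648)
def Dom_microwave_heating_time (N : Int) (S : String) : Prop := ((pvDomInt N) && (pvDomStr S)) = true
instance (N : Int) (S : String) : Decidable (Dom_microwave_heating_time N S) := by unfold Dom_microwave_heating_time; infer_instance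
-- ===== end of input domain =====

-- B replaces A's break-on-invalid accumulating loop by a two-stage shape (cut the maximal valid prefix, then a weighted sum of per-food counts); objective: alternative, same cost.
-- ===== PORT A =====
-- transliteration of A's for-loop with break and elif chain (accumulator = time)
-- `food not in "cbpho"` for a single char = char membership in the string's chars
def mhtGoA : List Char → Int → Int
  | [], time => time
  | food :: rest, time =>
    if ¬ (("cbpho".toList).contains food) then time
    else mhtGoA rest (time +
      (if food == 'c' then 4 * 60
       else if food == 'b' then 3 * 60
       else if food == 'p' then 3 * 60
       else if food == 'h' then 1 * 60 + 30
       else if food == 'o' then 50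
       else 0))

def microwave_heating_time (N : Int) (S : String) : Int :=
  mhtGoA S.toList 0

-- ===== PORT B =====
-- weights dict → association list (insertion order); `c in weights` = key membership
def mhtWeights : List (Char × Int) := [('c', 240), ('b', 180), ('p', 180), ('h', 90), ('o', 50)]

-- B's first loop: index of the first char of S not a key of weights, else len(S)
def mhtCut : List Char → Nat
  | [] => 0
  | c :: rest =>
    if (mhtWeights.map Prod.fst).contains c then mhtCut rest + 1 else 0

-- B's sum(w * prefix.count(f) for f, w in weights.items()) as a fold; for a
-- single char, str.count = char count in the char list
def microwave_heating_time_alt (N : Int) (S : String) : Int :=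
  let cut := mhtCut S.toList
  let pref := S.toList.take cut
  mhtWeights.foldl (fun acc fw => acc + fw.2 * (pref.count fw.1 : Int)) 0

-- ===== PRECONDITION & SPEC =====
def Spec_microwave_heating_time (N : Int) (S : String) (out : Int) : Prop := out = microwave_heating_time_alt N S
instance (N : Int) (S : String) (out : Int) : Decidable (Spec_microwave_heating_time N S out) := by unfold Spec_microwave_heating_time; infer_instance

-- ===== CLAIM (what is proved, stated in full; the proofs are below) =====
def Claim_equal_microwave_heating_time : Prop := ∀ (N : Int) (S : String), Dom_microwave_heating_time N S → Spec_microwave_heating_time N S (microwave_heating_time N S)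

-- ===== LEMMAS AND PROOFS =====
def mhtSumB (pref : List Char) : Int :=
  mhtWeights.foldl (fun acc fw => acc + fw.2 * (pref.count fw.1 : Int)) 0

theorem mhtKeys_eq : mhtWeights.map Prod.fst = "cbpho".toList := by decide

theorem mhtTake_cut (l : List Char) :
    l.take (mhtCut l) = l.takeWhile (fun c => (mhtWeights.map Prod.fst).contains c) := by
  induction l with
  | nil => rfl
  | cons c rest ih =>
    rw [mhtCut, List.takeWhile_cons]
    by_cases h : ((mhtWeights.map Prod.fst).contains c) = true
    · rw [if_pos h, if_pos h, List.take_succ_cons, ih]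
    · rw [if_neg h, if_neg h, List.take_zero]

theorem mhtSumB_nil : mhtSumB [] = 0 := by decide

theorem mhtSumB_cons (c : Char) (p : List Char)
    (h : (("cbpho".toList).contains c) = true) :
    mhtSumB (c :: p) = (if c == 'c' then (4 * 60 : Int)
       else if c == 'b' then 3 * 60
       else if c == 'p' then 3 * 60
       else if c == 'h' then 1 * 60 + 30
       else if c == 'o' then 50
       else 0) + mhtSumB p := by
  have hc : c = 'c' ∨ c = 'b' ∨ c = 'p' ∨ c = 'h' ∨ c = 'o' := by
    simpa using h
  rcases hc with rfl | rfl | rfl | rfl | rfl <;>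
    · simp [mhtSumB, mhtWeights, List.foldl, List.count_cons]
      ring

theorem mhtGoA_eq (l : List Char) (t : Int) :
    mhtGoA l t = t + mhtSumB (l.takeWhile (fun c => (mhtWeights.map Prod.fst).contains c)) := by
  induction l generalizing t with
  | nil => simp [mhtGoA, mhtSumB_nil]
  | cons c rest ih =>
    rw [mhtGoA, List.takeWhile_cons]
    by_cases h : (("cbpho".toList).contains c) = true
    · have h' : ((mhtWeights.map Prod.fst).contains c) = true := by rw [mhtKeys_eq]; exact h
      rw [if_neg (not_not_intro h), if_pos h', ih, mhtSumB_cons c _ h]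
      ring
    · have h' : ¬ ((mhtWeights.map Prod.fst).contains c) = true := by rw [mhtKeys_eq]; exact h
      rw [if_pos h, if_neg h']
      rw [mhtSumB_nil]
      ring

-- ===== VERDICT (by name: the statement is the Claim_ definition above) =====
theorem microwave_heating_time_spec : Claim_equal_microwave_heating_time := by
  intro N S _
  unfold Spec_microwave_heating_time
  have halt : microwave_heating_time_alt N S = mhtSumB (S.toList.take (mhtCut S.toList)) := rfl
  rw [halt, mhtTake_cut]
  unfold microwave_heating_time
  rw [mhtGoA_eq, zero_add]
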